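-- pv_equiv track=rewrite | github.com/BaeLab/STRiker | analyze_func_pysam/analyze_func.py | get_maximum_consecutive_repeats
-- ===== SOURCE A (Python) =====
-- from typing import List, Tuple, KeysView, Dict
--
-- def get_maximum_consecutive_repeats(pattern_list: list, motifs: list) -> Dict[str, int]:
--     """
--     pattern_list에서 motif가 몇 번 연속으로 등장하는지 찾는 함수.
--     """
--     result_dict = {}
--     # result_dict 초기화
--     for motif in motifs:
--         result_dict[motif] = 0
--
--     for motif, count in pattern_list:
--         if motif in motifs:
--             if count > result_dict[motif]:
--                 result_dict[motif] = count
--     return result_dict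
-- ===== SOURCE B (Python) =====
-- def get_maximum_consecutive_repeats(pattern_list: list, motifs: list):
--     # One dict comprehension: for each motif take the max matching count, floored at 0.
--     return {m: max([c for mm, c in pattern_list if mm == m] + [0]) for m in motifs}
-- ===== Notes on version B (the rewrite author's own statement) =====
-- stated objective: simpler
-- what changed: Replaced A's mutable table maintained across a single pass over pattern_list by a dict comprehension over motifs that, per motif, takes the max of the matching counts (floored at 0).
import Mathlib
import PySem

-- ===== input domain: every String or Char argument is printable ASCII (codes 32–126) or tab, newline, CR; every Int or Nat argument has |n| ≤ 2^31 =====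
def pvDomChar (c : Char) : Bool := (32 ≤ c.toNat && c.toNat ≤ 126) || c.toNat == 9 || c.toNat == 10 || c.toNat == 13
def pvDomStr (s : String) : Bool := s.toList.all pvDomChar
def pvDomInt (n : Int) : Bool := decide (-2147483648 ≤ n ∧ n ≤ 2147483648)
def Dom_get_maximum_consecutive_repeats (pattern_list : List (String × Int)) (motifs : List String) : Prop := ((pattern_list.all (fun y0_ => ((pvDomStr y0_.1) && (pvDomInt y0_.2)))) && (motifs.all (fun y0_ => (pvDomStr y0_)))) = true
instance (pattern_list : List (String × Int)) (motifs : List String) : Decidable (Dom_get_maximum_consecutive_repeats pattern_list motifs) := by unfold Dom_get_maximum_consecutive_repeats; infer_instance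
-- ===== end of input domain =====

-- B replaces A's maintained table over one pass of pattern_list by a per-motif max of the
-- matching counts (floored at 0), as a dict comprehension; objective: simpler (a one-liner).

-- ===== PORT A =====
def get_maximum_consecutive_repeats (pattern_list : List (String × Int)) (motifs : List String) : List (String × Int) :=
  -- result_dict = {}; for motif in motifs: result_dict[motif] = 0
  let d0 : PySem.Dict String Int := motifs.foldl (fun d m => d.insert m (0 : Int)) PySem.Dict.empty
  -- for motif, count in pattern_list: if motif in motifs: if count > result_dict[motif]: result_dict[motif] = count
  let d1 := pattern_list.foldl (fun d p =>
    if motifs.contains p.1 then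
      (if p.2 > d.getD p.1 0 then d.insert p.1 p.2 else d)
    else d) d0
  d1.items

-- ===== PORT B =====
-- max(xs) of a nonempty list; the `none` arm is unreachable (the list always carries the trailing 0)
def pvMaxList (xs : List Int) : Int :=
  match PySem.List.max? xs (fun y => y) with
  | some x => x
  | none => 0

def get_maximum_consecutive_repeats_alt (pattern_list : List (String × Int)) (motifs : List String) : List (String × Int) :=
  -- {m: max([c for mm, c in pattern_list if mm == m] + [0]) for m in motifs}
  (motifs.foldl (fun d m =>
      d.insert m (pvMaxList (((pattern_list.filter (fun p => p.1 == m)).map (fun p => p.2)) ++ [(0 : Int)])))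
    PySem.Dict.empty).items

-- ===== PRECONDITION & SPEC =====
def Spec_get_maximum_consecutive_repeats (pattern_list : List (String × Int)) (motifs : List String) (out : List (String × Int)) : Prop := out = get_maximum_consecutive_repeats_alt pattern_list motifs
instance (pattern_list : List (String × Int)) (motifs : List String) (out : List (String × Int)) : Decidable (Spec_get_maximum_consecutive_repeats pattern_list motifs out) := by unfold Spec_get_maximum_consecutive_repeats; infer_instance

-- ===== CLAIM (what is proved, stated in full; the proofs are below) =====
def Claim_equal_get_maximum_consecutive_repeats : Prop := ∀ (pattern_list : List (String × Int)) (motifs : List String), Dom_get_maximum_consecutive_repeats pattern_list motifs → Spec_get_maximum_consecutive_repeats pattern_list motifs (get_maximum_consecutive_repeats pattern_list motifs)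

-- ===== LEMMAS AND PROOFS =====

-- getD through a fold of inserts whose value depends only on the key
theorem pv_getD_foldl_insert_fn (v : String → Int) (ms : List String) (d : PySem.Dict String Int) (k : String) :
    (ms.foldl (fun d m => d.insert m (v m)) d).getD k 0 = if k ∈ ms then v k else d.getD k 0 := by
  induction ms generalizing d with
  | nil => simp
  | cons x xs ih =>
    simp only [List.foldl_cons, ih, PySem.Dict.getD_insert, List.mem_cons]
    split_ifs <;> simp_all

-- A's second loop: the step preserves the key list when every motif key is already present
theorem pv_keys_loopA (motifs : List String) (l : List (String × Int)) (d : PySem.Dict String Int)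
    (h : ∀ k, k ∈ motifs → d.contains k = true) :
    (l.foldl (fun d p =>
      if motifs.contains p.1 then
        (if p.2 > d.getD p.1 0 then d.insert p.1 p.2 else d)
      else d) d).keys = d.keys := by
  induction l generalizing d with
  | nil => rfl
  | cons p t ih =>
    rw [List.foldl_cons]
    by_cases hm : motifs.contains p.1 = true
    · rw [if_pos hm]
      by_cases hc : p.2 > d.getD p.1 0
      · rw [if_pos hc, ih]
        · exact PySem.Dict.keys_insert_of_contains d p.2 (h _ (by simpa using hm))
        · intro k hk
          rw [PySem.Dict.contains_insert]
          simp [h k hk]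
      · rw [if_neg hc]; exact ih d h
    · rw [if_neg hm]; exact ih d h

-- A's second loop, pointwise: getD at m is the running max over the counts matching m
theorem pv_getD_loopA (motifs : List String) (l : List (String × Int)) (d : PySem.Dict String Int)
    (m : String) :
    (l.foldl (fun d p =>
      if motifs.contains p.1 then
        (if p.2 > d.getD p.1 0 then d.insert p.1 p.2 else d)
      else d) d).getD m 0 =
    ((if motifs.contains m then l.filter (fun p => p.1 == m) else []).foldl
      (fun acc p => if p.2 > acc then p.2 else acc) (d.getD m 0)) := by
  induction l generalizing d with
  | nil => split <;> simp
  | cons p t ih =>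
    rw [List.foldl_cons, ih]
    by_cases hm : motifs.contains p.1 = true
    · by_cases he : p.1 = m
      · subst he
        have e1 : (if motifs.contains p.1 = true then (if p.2 > d.getD p.1 0 then d.insert p.1 p.2 else d) else d) = (if p.2 > d.getD p.1 0 then d.insert p.1 p.2 else d) := if_pos hm
        have e2 : (if motifs.contains p.1 = true then List.filter (fun q => q.1 == p.1) t else []) = List.filter (fun q => q.1 == p.1) t := if_pos hm
        have e3 : (if motifs.contains p.1 = true then List.filter (fun q => q.1 == p.1) (p :: t) else []) = p :: List.filter (fun q => q.1 == p.1) t := by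
          rw [if_pos hm, List.filter_cons, if_pos (by simp)]
        rw [e1, e2, e3, List.foldl_cons]
        congr 1
        by_cases hc : p.2 > d.getD p.1 0
        · simp [hc, PySem.Dict.getD_insert_self]
        · simp [hc]
      · have hne : (p.1 == m) = false := by simp [he]
        have h1 : (if p.2 > d.getD p.1 0 then d.insert p.1 p.2 else d).getD m 0 = d.getD m 0 := by
          by_cases hc : p.2 > d.getD p.1 0
          · rw [if_pos hc]; exact PySem.Dict.getD_insert_of_ne d p.2 0 (Ne.symm he)
          · rw [if_neg hc]
        rw [if_pos hm, h1, List.filter_cons]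
        simp [hne]
    · rw [if_neg hm]
      by_cases hcm : motifs.contains m = true
      · have hne : (p.1 == m) = false := by
          apply beq_eq_false_iff_ne.mpr
          intro h; rw [h] at hm; exact hm hcm
        rw [if_pos hcm, if_pos hcm, List.filter_cons]
        simp [hne]
      · rw [if_neg hcm, if_neg hcm]

-- the running (if c > acc then c else acc) is foldl max over the projected counts
theorem pv_step_eq_max (l : List (String × Int)) (a : Int) :
    l.foldl (fun acc p => if p.2 > acc then p.2 else acc) a = (l.map (fun p => p.2)).foldl max a := by
  induction l generalizing a with
  | nil => rfl
  | cons p t ih =>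
    rw [List.foldl_cons, List.map_cons, List.foldl_cons, ih]
    congr 1
    simp only [max_def]
    split_ifs <;> omega

-- B's value: max(cs + [0]) equals the running max from 0
theorem pv_maxList_eq (cs : List Int) : pvMaxList (cs ++ [0]) = cs.foldl max 0 := by
  cases cs with
  | nil => rfl
  | cons c t =>
    simp only [pvMaxList, List.cons_append, PySem.List.max?_id_cons]
    rw [List.foldl_append]
    simp only [List.foldl_cons, List.foldl_nil]
    rw [List.foldl_assoc]
    exact max_comm _ _

-- keys of a fold of inserts over motifs from the empty dict
theorem pv_keys_init (v : String → Int) (motifs : List String) :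
    (motifs.foldl (fun d m => d.insert m (v m)) PySem.Dict.empty).keys = PySem.Set.ofList motifs := by
  rw [PySem.Dict.keys_foldl_insert]
  simp [PySem.Dict.keys_empty, PySem.Set.update_nil_left]

-- ===== VERDICT (by name: the statement is the Claim_ definition above) =====
theorem get_maximum_consecutive_repeats_spec : Claim_equal_get_maximum_consecutive_repeats := by
  intro pattern_list motifs _
  unfold Spec_get_maximum_consecutive_repeats
  simp only [get_maximum_consecutive_repeats, get_maximum_consecutive_repeats_alt]
  set vB : String → Int := fun m => pvMaxList (((pattern_list.filter (fun p => p.1 == m)).map (fun p => p.2)) ++ [(0 : Int)]) with hvB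
  set d0 : PySem.Dict String Int := motifs.foldl (fun d m => d.insert m (0 : Int)) PySem.Dict.empty with hd0
  set dB : PySem.Dict String Int := motifs.foldl (fun d m => d.insert m (vB m)) PySem.Dict.empty with hdB
  have hk0 : d0.keys = PySem.Set.ofList motifs := pv_keys_init (fun _ => 0) motifs
  have hkB : dB.keys = PySem.Set.ofList motifs := pv_keys_init vB motifs
  have hcont : ∀ k, k ∈ motifs → d0.contains k = true := by
    intro k hk
    exact (PySem.Dict.contains_iff_mem_keys d0 k).mpr (by rw [hk0]; exact (PySem.Set.mem_ofList motifs k).mpr hk)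
  set d1 := pattern_list.foldl (fun d p =>
      if motifs.contains p.1 then
        (if p.2 > d.getD p.1 0 then d.insert p.1 p.2 else d)
      else d) d0 with hd1
  have hk1 : d1.keys = PySem.Set.ofList motifs := by
    rw [hd1, pv_keys_loopA motifs pattern_list d0 hcont, hk0]
  have hnd : (PySem.Set.ofList motifs).Nodup := PySem.Set.nodup_ofList motifs
  have hgd : ∀ m, m ∈ motifs → d1.getD m 0 = dB.getD m 0 := by
    intro m hm
    have hmc : motifs.contains m = true := by simpa using hm
    rw [hd1, pv_getD_loopA, if_pos hmc]
    rw [hd0, pv_getD_foldl_insert_fn (fun _ => 0) motifs PySem.Dict.empty m, if_pos hm]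
    rw [hdB, pv_getD_foldl_insert_fn vB motifs PySem.Dict.empty m, if_pos hm]
    rw [pv_step_eq_max]
    exact (pv_maxList_eq _).symm
  rw [PySem.Dict.items_eq_map_keys d1 (by rw [hk1]; exact hnd) 0,
      PySem.Dict.items_eq_map_keys dB (by rw [hkB]; exact hnd) 0, hk1, hkB]
  apply List.map_congr_left
  intro m hmset
  exact congrArg _ (hgd m ((PySem.Set.mem_ofList motifs m).mp hmset))
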